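-- pv_equiv track=rewrite | github.com/smoksde/circuits | software_beame.py | find_primitive_roots
-- ===== SOURCE A (Python) =====
-- import math
--
-- def is_primitive_root(g, n):
--     if math.gcd(g, n) != 1:
--         return False
--     totient = len([i for i in range(1, n) if math.gcd(i, n) == 1])
--     powers = set([pow(g, i, n) for i in range(1, totient + 1)])
--     group = set([i for i in range(1, n) if math.gcd(i, n) == 1])
--     return powers == group
--
-- def find_primitive_roots(n):
--     roots = []
--     for p in range(1, n + 1):
--         found = False
--         value = 0
--         for g in range(1, p):
--             if is_primitive_root(g, p):
--                 found = True
--                 value = g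
--             if found:
--                 break
--         roots.append(value)
--     return roots
-- ===== SOURCE B (Python) =====
-- import math
--
-- def prime_factors(m):
--     # distinct prime divisors of m by trial division
--     qs = []
--     d = 2
--     while d * d <= m:
--         if m % d == 0:
--             qs.append(d)
--             while m % d == 0:
--                 m //= d
--         d += 1
--     if m > 1:
--         qs.append(m)
--     return qs
--
-- def smallest_primitive_root(p):
--     t = len([i for i in range(1, p) if math.gcd(i, p) == 1])
--     qs = prime_factors(t)
--     # g is a primitive root mod p iff gcd(g,p)=1 and g^(t/q) != 1 (mod p)
--     # for every prime q dividing t (order test via the prime factors of the totient)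
--     return next((g for g in range(1, p)
--                  if math.gcd(g, p) == 1
--                  and all(pow(g, t // q, p) != 1 for q in qs)), 0)
--
-- def find_primitive_roots(n):
--     return [smallest_primitive_root(p) for p in range(1, n + 1)]
-- ===== Notes on version B (the rewrite author's own statement) =====
-- stated objective: faster
-- what changed: B replaces A's power-set test (build the set of the first totient-many powers of each candidate g and compare it with the whole unit group) by the classical order test: factor the totient t once per modulus and accept the first coprime g none of whose powers g^(t/q), q a prime factor of t, is the identity mod p, so no per-candidate set is ever built.
import Mathlib
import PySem

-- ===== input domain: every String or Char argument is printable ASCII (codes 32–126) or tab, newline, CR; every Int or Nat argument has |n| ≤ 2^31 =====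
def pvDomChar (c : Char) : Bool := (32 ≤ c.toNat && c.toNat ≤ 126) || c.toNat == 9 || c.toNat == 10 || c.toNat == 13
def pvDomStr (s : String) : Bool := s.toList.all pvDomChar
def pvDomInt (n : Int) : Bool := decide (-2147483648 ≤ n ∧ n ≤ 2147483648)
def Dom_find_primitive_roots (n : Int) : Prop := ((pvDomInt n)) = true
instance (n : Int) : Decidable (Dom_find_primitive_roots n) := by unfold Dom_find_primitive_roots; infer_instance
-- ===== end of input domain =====

-- B replaces A's per-candidate power-set comparison by the classical order test: factor the
-- totient t once per modulus and accept the first coprime g with g^(t/q) != 1 mod p for every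
-- prime q | t (measured asymptotically faster in a timing run); same return value everywhere.


-- ===== PORT A =====
-- pow(g, i, n): i ranges over range(1, totient+1), so i ≥ 1 and `.toNat` is exact here.
def is_primitive_root (g n : Int) : Bool :=
  if Int.gcd g n ≠ 1 then false
  else
    let totient : Int := (((PySem.List.pyRange 1 n 1).filter (fun i => Int.gcd i n == 1)).length : Int)
    let powers : PySem.Set Int :=
      PySem.Set.ofList ((PySem.List.pyRange 1 (totient + 1) 1).map (fun i => PySem.Int.powMod g i.toNat n))
    let group : PySem.Set Int :=
      PySem.Set.ofList ((PySem.List.pyRange 1 n 1).filter (fun i => Int.gcd i n == 1))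
    PySem.Set.equal powers group

-- A's inner 'for g in range(1, p)' loop with its found/value state and break.
def findRootLoopA (p : Int) : List Int → Bool → Int → Int
  | [], _, value => value
  | g :: gs, found, value =>
    let fv := if is_primitive_root g p then (true, g) else (found, value)
    if fv.1 then fv.2 else findRootLoopA p gs fv.1 fv.2

def find_primitive_roots (n : Int) : List Int :=
  (PySem.List.pyRange 1 (n + 1) 1).foldl
    (fun roots p => roots ++ [findRootLoopA p (PySem.List.pyRange 1 p 1) false 0]) []

-- ===== PORT B =====
-- In Source B all values handled by prime_factors are nonnegative Python ints (t = a list length,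
-- d ≥ 2), so Nat arithmetic (%, /) is exact for Python's % and // here.
-- the inner 'while m % d == 0: m //= d' of prime_factors (guard makes the recursion total)
def removeFac (m d : Nat) : Nat :=
  if h : 1 ≤ m ∧ 2 ≤ d ∧ m % d = 0 then removeFac (m / d) d else m
  termination_by m
  decreasing_by exact Nat.div_lt_self h.1 h.2.1

-- facts the outer trial-division loop's termination measure needs
lemma removeFac_le (m d : Nat) : removeFac m d ≤ m := by
  induction m using removeFac.induct d with
  | case1 m h ih => rw [removeFac, dif_pos h]; exact le_trans ih (Nat.div_le_self m d)
  | case2 m h => rw [removeFac, dif_neg h]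

lemma lt_add_two_of_sq_le {d m : Nat} (h : d * d ≤ m) : d < m + 2 := by
  rcases Nat.lt_or_ge d 2 with hd | hd
  · omega
  · have : d ≤ d * d := Nat.le_mul_of_pos_left d (by omega)
    omega

-- the outer 'while d * d <= m' loop of prime_factors, with the trailing 'if m > 1' appended
def facLoop (m d : Nat) : List Nat :=
  if h : d * d ≤ m then
    (if m % d = 0 then d :: facLoop (removeFac m d) (d + 1) else facLoop m (d + 1))
  else if 1 < m then [m] else []
  termination_by m + 2 - d
  decreasing_by
  · have h1 := removeFac_le m d
    have h2 := lt_add_two_of_sq_le h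
    omega
  · have h2 := lt_add_two_of_sq_le h
    omega

def prime_factors (m : Nat) : List Nat := facLoop m 2

def smallest_primitive_root (p : Int) : Int :=
  let t : Nat := ((PySem.List.pyRange 1 p 1).filter (fun i => Int.gcd i p == 1)).length
  let qs := prime_factors t
  ((PySem.List.pyRange 1 p 1).find? (fun g =>
      Int.gcd g p == 1 && qs.all (fun q => PySem.Int.powMod g (t / q) p != 1))).getD 0

def find_primitive_roots_alt (n : Int) : List Int :=
  (PySem.List.pyRange 1 (n + 1) 1).map (fun p => smallest_primitive_root p)

-- ===== PRECONDITION & SPEC =====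
def Spec_find_primitive_roots (n : Int) (out : List Int) : Prop := out = find_primitive_roots_alt n
instance (n : Int) (out : List Int) : Decidable (Spec_find_primitive_roots n out) := by unfold Spec_find_primitive_roots; infer_instance

-- ===== CLAIM (what is proved, stated in full; the proofs are below) =====
def Claim_equal_find_primitive_roots : Prop := ∀ (n : Int), Dom_find_primitive_roots n → Spec_find_primitive_roots n (find_primitive_roots n)

-- ===== LEMMAS AND PROOFS =====

-- ---------- trial-division correctness ----------

lemma removeFac_spec (m d : Nat) (hd : 2 ≤ d) (hm : 1 ≤ m) :
    ∃ k, m = removeFac m d * d ^ k ∧ ¬ d ∣ removeFac m d ∧ 1 ≤ removeFac m d := by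
  induction m using removeFac.induct d with
  | case1 m h ih =>
    rw [removeFac, dif_pos h]
    have hdvd : d ∣ m := Nat.dvd_of_mod_eq_zero h.2.2
    have hq : 1 ≤ m / d := (Nat.one_le_div_iff (by omega)).mpr (Nat.le_of_dvd hm hdvd)
    obtain ⟨k, hk1, hk2, hk3⟩ := ih hq
    refine ⟨k + 1, ?_, hk2, hk3⟩
    calc m = m / d * d := (Nat.div_mul_cancel hdvd).symm
    _ = removeFac (m / d) d * d ^ k * d := by rw [← hk1]
    _ = removeFac (m / d) d * d ^ (k + 1) := by ring
  | case2 m h =>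
    rw [removeFac, dif_neg h]
    refine ⟨0, by ring, ?_, hm⟩
    intro hdvd
    exact h ⟨hm, hd, Nat.dvd_iff_mod_eq_zero.mp hdvd⟩

lemma facLoop_mem (m d : Nat) (hm : 1 ≤ m) (hd : 2 ≤ d)
    (hmin : ∀ q, q.Prime → q ∣ m → d ≤ q) :
    ∀ q, q ∈ facLoop m d ↔ q.Prime ∧ q ∣ m := by
  induction m, d using facLoop.induct with
  | case1 m d hsq hdvd0 ih =>
    have hdvd : d ∣ m := Nat.dvd_of_mod_eq_zero hdvd0
    -- d is prime: m has no prime factor < d, and d ∣ m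
    have hdprime : d.Prime := by
      rw [Nat.prime_def_lt]
      refine ⟨hd, fun c hcd hcdvd => ?_⟩
      by_contra hc1
      obtain ⟨q, hq, hqc⟩ := Nat.exists_prime_and_dvd hc1
      have hc0 : c ≠ 0 := by rintro rfl; omega
      have hqle : q ≤ c := Nat.le_of_dvd (by omega) hqc
      have := hmin q hq (hqc.trans (hcdvd.trans hdvd))
      omega
    obtain ⟨k, hk1, hk2, hk3⟩ := removeFac_spec m d hd hm
    set r := removeFac m d with hr
    have hrdvd : r ∣ m := ⟨d ^ k, hk1⟩
    have hmin' : ∀ q, q.Prime → q ∣ r → d + 1 ≤ q := by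
      intro q hq hqr
      have h1 := hmin q hq (hqr.trans hrdvd)
      rcases Nat.lt_or_ge d q with h | h
      · omega
      · have hqd : q = d := by omega
        exact absurd (hqd ▸ hqr) hk2
    have ihr := ih hk3 (by omega) hmin'
    intro q
    rw [facLoop, dif_pos hsq, if_pos hdvd0]
    constructor
    · intro hmem
      rcases List.mem_cons.mp hmem with h | h
      · exact h ▸ ⟨hdprime, hdvd⟩
      · obtain ⟨h1, h2⟩ := (ihr q).mp h
        exact ⟨h1, h2.trans hrdvd⟩
    · rintro ⟨hq, hqm⟩
      by_cases hqd : q = d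
      · exact hqd ▸ List.mem_cons_self
      · refine List.mem_cons_of_mem _ ((ihr q).mpr ⟨hq, ?_⟩)
        have hcop : Nat.Coprime q (d ^ k) :=
          Nat.Coprime.pow_right _ ((Nat.coprime_primes hq hdprime).mpr hqd)
        exact hcop.dvd_of_dvd_mul_right (hk1 ▸ hqm)
  | case2 m d hsq hdvd0 ih =>
    have hmin' : ∀ q, q.Prime → q ∣ m → d + 1 ≤ q := by
      intro q hq hqm
      have h1 := hmin q hq hqm
      rcases Nat.lt_or_ge d q with h | h
      · omega
      · have hqd : q = d := by omega
        exact absurd (Nat.dvd_iff_mod_eq_zero.mp (hqd ▸ hqm)) hdvd0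
    intro q
    rw [facLoop, dif_pos hsq, if_neg hdvd0]
    exact ih hm (by omega) hmin' q
  | case3 m d hsq hm1 =>
    have hmprime : m.Prime := by
      rw [Nat.prime_def_lt]
      refine ⟨hm1, fun c hcm hcdvd => ?_⟩
      by_contra hc1
      obtain ⟨q, hq, hqc⟩ := Nat.exists_prime_and_dvd hc1
      have hc0 : c ≠ 0 := by rintro rfl; simp at hcdvd; omega
      have hcdvd' := hcdvd
      obtain ⟨s, hs⟩ := hcdvd'
      have hs1 : s ≠ 1 := by rintro rfl; rw [mul_one] at hs; omega
      obtain ⟨q', hq', hq's⟩ := Nat.exists_prime_and_dvd hs1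
      have hsdvd : s ∣ m := ⟨c, by rw [hs]; ring⟩
      have h1 := hmin q hq (hqc.trans hcdvd)
      have h2 := hmin q' hq' (hq's.trans hsdvd)
      have hqle : q ≤ c := Nat.le_of_dvd (by omega) hqc
      have hs0 : s ≠ 0 := by rintro rfl; rw [mul_zero] at hs; omega
      have hq'le : q' ≤ s := Nat.le_of_dvd (by omega) hq's
      have : d * d ≤ c * s := Nat.mul_le_mul (by omega) (by omega)
      rw [← hs] at this
      omega
    intro q
    rw [facLoop, dif_neg hsq, if_pos hm1]
    simp only [List.mem_singleton]
    constructor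
    · rintro rfl; exact ⟨hmprime, dvd_rfl⟩
    · rintro ⟨hq, hqm⟩
      rcases (Nat.Prime.eq_one_or_self_of_dvd hmprime q hqm) with h | h
      · exact absurd h hq.ne_one
      · exact h
  | case4 m d hsq hm1 =>
    have : m = 1 := by omega
    subst this
    intro q
    rw [facLoop, dif_neg hsq, if_neg hm1]
    simp only [List.not_mem_nil, false_iff]
    rintro ⟨hq, hqm⟩
    exact hq.ne_one (Nat.eq_one_of_dvd_one hqm)

lemma prime_factors_mem (m : Nat) (hm : 1 ≤ m) :
    ∀ q, q ∈ prime_factors m ↔ q.Prime ∧ q ∣ m := by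
  refine facLoop_mem m 2 hm le_rfl ?_
  intro q hq _; exact hq.two_le

-- ---------- generic list-loop shapes ----------

lemma findRootLoopA_eq_find? (p : Int) (l : List Int) :
    findRootLoopA p l false 0 = ((l.find? (fun g => is_primitive_root g p)).getD 0) := by
  induction l with
  | nil => simp [findRootLoopA]
  | cons g gs ih =>
    by_cases h : is_primitive_root g p
    · simp [findRootLoopA, h, List.find?]
    · simp [findRootLoopA, h, List.find?, ih]

lemma find?_congr_mem {l : List Int} {p q : Int → Bool} (h : ∀ a ∈ l, p a = q a) :
    l.find? p = l.find? q := by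
  induction l with
  | nil => rfl
  | cons a as ih =>
    have ha := h a (by simp)
    simp only [List.find?]
    rw [← ha]
    cases hpa : p a
    · exact ih (fun b hb => h b (by simp [hb]))
    · rfl

-- ---------- per-modulus notation ----------

-- the list [i for i in range(1, p) if gcd(i, p) == 1] both programs build
def unitsL (p : Int) : List Int :=
  (PySem.List.pyRange 1 p 1).filter (fun i => Int.gcd i p == 1)

lemma mem_unitsL {p y : Int} : y ∈ unitsL p ↔ (1 ≤ y ∧ y < p) ∧ Int.gcd y p = 1 := by
  simp [unitsL, List.mem_filter, PySem.List.mem_pyRange_one]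

lemma unitsL_nodup (p : Int) : (unitsL p).Nodup :=
  (PySem.List.nodup_pyRange_one 1 p).filter _

lemma one_le_unitsL_length {p : Int} (hp : 2 ≤ p) : 1 ≤ (unitsL p).length := by
  have h1 : (1 : Int) ∈ unitsL p := mem_unitsL.mpr ⟨⟨le_rfl, by omega⟩, by simp⟩
  exact List.length_pos_of_mem h1

-- ---------- ZMod bridge ----------

lemma cast_inj_of_canon {p a b : Int} (hp : 2 ≤ p)
    (ha0 : 0 ≤ a) (hap : a < p) (hb0 : 0 ≤ b) (hbp : b < p)
    (h : ((a : ZMod p.toNat) = (b : ZMod p.toNat))) : a = b := by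
  have hm := (ZMod.intCast_eq_intCast_iff a b p.toNat).mp h
  have hN : ((p.toNat : Nat) : Int) = p := Int.toNat_of_nonneg (by omega)
  unfold Int.ModEq at hm
  rw [hN] at hm
  rw [Int.emod_eq_of_lt ha0 hap, Int.emod_eq_of_lt hb0 hbp] at hm
  exact hm

lemma powMod_cast {p : Int} (hp : 2 ≤ p) (g : Int) (e : Nat) :
    ((PySem.Int.powMod g e p : Int) : ZMod p.toNat) = ((g : ZMod p.toNat)) ^ e := by
  have hN : ((p.toNat : Nat) : Int) = p := Int.toNat_of_nonneg (by omega)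
  rw [show PySem.Int.powMod g e p = PySem.Int.mod (g ^ e) p from rfl,
    PySem.Int.mod_eq_emod_of_pos (show (0:Int) < p by omega)]
  have : ((g ^ e % p : Int) : ZMod p.toNat) = ((g ^ e : Int) : ZMod p.toNat) := by
    apply (ZMod.intCast_eq_intCast_iff _ _ _).mpr
    rw [hN]
    exact Int.emod_emod_of_dvd _ dvd_rfl
  rw [this]; push_cast; ring

lemma powMod_eq_one_iff {p : Int} (hp : 2 ≤ p) (g : Int) (e : Nat) :
    PySem.Int.powMod g e p = 1 ↔ ((g : ZMod p.toNat)) ^ e = 1 := by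
  constructor
  · intro h
    rw [← powMod_cast hp g e, h]; simp
  · intro h
    have hb1 : 0 ≤ PySem.Int.powMod g e p := PySem.Int.mod_nonneg _ (by omega)
    have hb2 : PySem.Int.powMod g e p < p := PySem.Int.mod_lt _ (by omega)
    refine cast_inj_of_canon hp hb1 hb2 (by omega) (by omega) ?_
    rw [powMod_cast hp g e, h]; simp

lemma isUnit_cast_of_coprime {p y : Int} (hp : 2 ≤ p) (hy : 0 ≤ y)
    (h : Int.gcd y p = 1) : IsUnit ((y : ZMod p.toNat)) := by
  have h2 : Nat.Coprime y.toNat p.toNat := by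
    have e1 : y.natAbs = y.toNat := by omega
    have e2 : p.natAbs = p.toNat := by omega
    have h' : Nat.gcd y.natAbs p.natAbs = 1 := h
    rwa [e1, e2] at h' 
  have hcast : ((y : ZMod p.toNat)) = ((y.toNat : Nat) : ZMod p.toNat) := by
    rw [← Int.toNat_of_nonneg hy]; push_cast; rfl
  rw [hcast]
  exact (ZMod.isUnit_iff_coprime _ _).mpr h2

lemma unitsL_length_eq_totient {p : Int} (hp : 2 ≤ p) :
    (unitsL p).length = Nat.totient p.toNat := by
  obtain ⟨M, hM⟩ : ∃ M, p.toNat = M + 1 := ⟨p.toNat - 1, by omega⟩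
  have hM1 : 1 ≤ M := by omega
  have hL : (unitsL p).length
      = (List.range M).countP (fun k : Nat => ((1 + (k : Int)).gcd p == 1)) := by
    unfold unitsL
    rw [PySem.List.pyRange_one]
    have h1 : (p - 1).toNat = M := by omega
    rw [h1, ← List.countP_eq_length_filter, List.countP_map]
    rfl
  have hR : Nat.totient p.toNat
      = (List.range (M + 1)).countP (fun i => decide (Nat.Coprime (M+1) i)) := by
    rw [hM, Nat.totient_eq_card_coprime]
    simp [Finset.filter, Finset.range, Multiset.range, Finset.card,
      ← List.countP_eq_length_filter]
  have hsplit : (List.range (M + 1)).countP (fun i => decide (Nat.Coprime (M+1) i))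
      = (List.range M).countP (fun k => decide (Nat.Coprime (M+1) (k+1))) := by
    rw [List.range_succ_eq_map, List.countP_cons, List.countP_map]
    have h0 : (decide (Nat.Coprime (M+1) 0)) = false := by
      simp [Nat.Coprime]; omega
    rw [h0]
    simp [Function.comp_def, Nat.succ_eq_add_one]
  rw [hL, hR, hsplit]
  apply List.countP_congr
  intro k hk
  have hg : Int.gcd (1 + (k:Int)) p = Nat.gcd (k+1) (M+1) := by
    have e1 : (1 + (k:Int)).natAbs = k + 1 := by omega
    have e2 : p.natAbs = M + 1 := by omega
    show Nat.gcd (1 + (k:Int)).natAbs p.natAbs = _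
    rw [e1, e2]
  simp [hg, Nat.Coprime, Nat.gcd_comm]

lemma euler {p g : Int} (hp : 2 ≤ p) (hg : 0 ≤ g) (hcop : Int.gcd g p = 1) :
    ((g : ZMod p.toNat)) ^ (unitsL p).length = 1 := by
  rw [unitsL_length_eq_totient hp]
  obtain ⟨u, hu⟩ := isUnit_cast_of_coprime hp hg hcop
  rw [← hu, ← Units.val_pow_eq_pow_val, ZMod.pow_totient u, Units.val_one]

-- ---------- the two tests both compute 'orderOf g = t' ----------

-- A's powers list, rewritten over List.range
lemma powersL_eq {p g : Int} (t : Nat) :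
    (PySem.List.pyRange 1 ((t : Int) + 1) 1).map (fun i => PySem.Int.powMod g i.toNat p)
      = (List.range t).map (fun k => PySem.Int.powMod g (k + 1) p) := by
  rw [PySem.List.pyRange_one]
  have h1 : (((t : Int) + 1 - 1)).toNat = t := by omega
  rw [h1, List.map_map]
  refine List.map_congr_left (fun k _ => ?_)
  simp only [Function.comp_apply]
  congr 1
  omega

lemma powersL_sub_unitsL {p g : Int} (hp : 2 ≤ p) (hcop : Int.gcd g p = 1)
    {t : Nat} : ∀ y ∈ (List.range t).map (fun k => PySem.Int.powMod g (k + 1) p), y ∈ unitsL p := by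
  intro y hy
  obtain ⟨k, hk, rfl⟩ := List.mem_map.mp hy
  have hval : PySem.Int.powMod g (k+1) p = g ^ (k+1) % p := by
    show PySem.Int.mod (g ^ (k+1)) p = _
    exact PySem.Int.mod_eq_emod_of_pos (show (0:Int) < p by omega)
  have hgcd : Int.gcd (PySem.Int.powMod g (k+1) p) p = 1 := by
    rw [hval, Int.gcd_emod]
    exact Int.gcd_pow_left_of_gcd_eq_one hcop
  have h0 : 0 ≤ PySem.Int.powMod g (k+1) p := PySem.Int.mod_nonneg _ (by omega)
  have h1 : PySem.Int.powMod g (k+1) p < p := PySem.Int.mod_lt _ (by omega)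
  refine mem_unitsL.mpr ⟨⟨?_, h1⟩, hgcd⟩
  rcases eq_or_lt_of_le h0 with h | h
  · exfalso
    rw [← h] at hgcd
    simp [Int.gcd] at hgcd
    omega
  · omega

-- A's set comparison says exactly 'orderOf (g : ZMod p) = t'
lemma setEqual_iff_orderOf {p g : Int} (hp : 2 ≤ p) (hg0 : 0 ≤ g) (hcop : Int.gcd g p = 1) :
    (PySem.Set.equal
        (PySem.Set.ofList ((List.range (unitsL p).length).map (fun k => PySem.Int.powMod g (k + 1) p)))
        (PySem.Set.ofList (unitsL p)) = true)
      ↔ orderOf ((g : ZMod p.toNat)) = (unitsL p).length := by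
  haveI : NeZero p.toNat := ⟨by omega⟩
  set t := (unitsL p).length with hT
  set x : ZMod p.toNat := ((g : Int) : ZMod p.toNat) with hX
  have ht : 1 ≤ t := one_le_unitsL_length hp
  have hx : x ^ t = 1 := euler hp hg0 hcop
  set pl : List Int := (List.range t).map (fun k => PySem.Int.powMod g (k + 1) p) with hPL
  set P : Finset (ZMod p.toNat) := (pl.map (fun y : Int => (y : ZMod p.toNat))).toFinset with hP
  set U : Finset (ZMod p.toNat) := ((unitsL p).map (fun y : Int => (y : ZMod p.toNat))).toFinset with hU
  have hsub : ∀ y ∈ pl, y ∈ unitsL p := powersL_sub_unitsL hp hcop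
  have hbounds : ∀ y ∈ unitsL p, 0 ≤ y ∧ y < p := by
    intro y hy; have := mem_unitsL.mp hy; omega
  have hUnodup : ((unitsL p).map (fun y : Int => (y : ZMod p.toNat))).Nodup := by
    refine List.Nodup.map_on ?_ (unitsL_nodup p)
    intro a ha b hb hab
    have hb1 := hbounds a ha
    have hb2 := hbounds b hb
    exact cast_inj_of_canon hp hb1.1 hb1.2 hb2.1 hb2.2 hab
  have hcardU : U.card = t := by
    rw [hU, List.toFinset_card_of_nodup hUnodup, List.length_map]
  have hPsubU : P ⊆ U := by
    intro z hz
    rw [hP, List.mem_toFinset, List.mem_map] at hz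
    obtain ⟨y, hy, rfl⟩ := hz
    rw [hU, List.mem_toFinset, List.mem_map]
    exact ⟨y, hsub y hy, rfl⟩
  have hPmem : ∀ z, z ∈ P ↔ ∃ k < t, x ^ (k + 1) = z := by
    intro z
    rw [hP, List.mem_toFinset, List.mem_map]
    constructor
    · rintro ⟨y, hy, rfl⟩
      rw [hPL, List.mem_map] at hy
      obtain ⟨k, hk, rfl⟩ := hy
      exact ⟨k, List.mem_range.mp hk, (powMod_cast hp g (k + 1)).symm⟩
    · rintro ⟨k, hk, rfl⟩
      exact ⟨PySem.Int.powMod g (k + 1) p,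
        by rw [hPL, List.mem_map]; exact ⟨k, List.mem_range.mpr hk, rfl⟩,
        powMod_cast hp g (k + 1)⟩
  have hPimage : P = Finset.image (fun k => x ^ k) (Finset.range t) := by
    ext z
    rw [hPmem z, Finset.mem_image]
    constructor
    · rintro ⟨k, hk, rfl⟩
      rcases Nat.lt_or_ge (k + 1) t with h | h
      · exact ⟨k + 1, Finset.mem_range.mpr h, rfl⟩
      · have hkt : k + 1 = t := by omega
        refine ⟨0, Finset.mem_range.mpr (by omega), ?_⟩
        rw [pow_zero, ← hx, hkt]
    · rintro ⟨j, hj, rfl⟩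
      rw [Finset.mem_range] at hj
      rcases Nat.eq_zero_or_pos j with h | h
      · refine ⟨t - 1, by omega, ?_⟩
        rw [h, pow_zero, ← hx]
        congr 1
        omega
      · exact ⟨j - 1, by omega, by congr 1; omega⟩
  have hfin : IsOfFinOrder x := isOfFinOrder_iff_pow_eq_one.mpr ⟨t, by omega, hx⟩
  have hordpos : 0 < orderOf x := hfin.orderOf_pos
  have horddvd : orderOf x ∣ t := orderOf_dvd_of_pow_eq_one hx
  have himg2 : Finset.image (fun k => x ^ k) (Finset.range t)
      = Finset.image (fun k => x ^ k) (Finset.range (orderOf x)) := by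
    ext z
    simp only [Finset.mem_image, Finset.mem_range]
    constructor
    · rintro ⟨k, hk, rfl⟩
      exact ⟨k % orderOf x, Nat.mod_lt _ hordpos, pow_mod_orderOf x k⟩
    · rintro ⟨k, hk, rfl⟩
      exact ⟨k, lt_of_lt_of_le hk (Nat.le_of_dvd (by omega) horddvd), rfl⟩
  have hcardP : P.card = orderOf x := by
    rw [hPimage, himg2, Finset.card_image_of_injOn, Finset.card_range]
    intro a ha b hb hab
    exact pow_injOn_Iio_orderOf (by simpa using ha) (by simpa using hb) hab
  rw [PySem.Set.equal_iff]
  constructor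
  · intro h
    have hmemiff : ∀ y : Int, y ∈ pl ↔ y ∈ unitsL p := by
      intro y
      have := h y
      rwa [PySem.Set.mem_ofList, PySem.Set.mem_ofList] at this
    have hPeqU : P = U := by
      ext z
      rw [hP, hU, List.mem_toFinset, List.mem_toFinset, List.mem_map, List.mem_map]
      constructor
      · rintro ⟨y, hy, rfl⟩; exact ⟨y, (hmemiff y).mp hy, rfl⟩
      · rintro ⟨y, hy, rfl⟩; exact ⟨y, (hmemiff y).mpr hy, rfl⟩
    rw [← hcardP, hPeqU, hcardU]
  · intro hord
    have hPeqU : P = U :=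
      Finset.eq_of_subset_of_card_le hPsubU (by rw [hcardU, hcardP, hord])
    intro y
    rw [PySem.Set.mem_ofList, PySem.Set.mem_ofList]
    constructor
    · exact hsub y
    · intro hy
      have hyU : ((y : Int) : ZMod p.toNat) ∈ U := by
        rw [hU, List.mem_toFinset, List.mem_map]
        exact ⟨y, hy, rfl⟩
      rw [← hPeqU, hP, List.mem_toFinset, List.mem_map] at hyU
      obtain ⟨z, hz, hzy⟩ := hyU
      have hb1 := hbounds z (hsub z hz)
      have hb2 := hbounds y hy
      have : z = y := cast_inj_of_canon hp hb1.1 hb1.2 hb2.1 hb2.2 hzy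
      rwa [← this]

-- B's order test says the same
lemma allTest_iff_orderOf {p g : Int} (hp : 2 ≤ p) (hg0 : 0 ≤ g) (hcop : Int.gcd g p = 1) :
    ((prime_factors (unitsL p).length).all
        (fun q => PySem.Int.powMod g ((unitsL p).length / q) p != 1) = true)
      ↔ orderOf ((g : ZMod p.toNat)) = (unitsL p).length := by
  set t := (unitsL p).length with hT
  have ht : 1 ≤ t := one_le_unitsL_length hp
  have hx : ((g : ZMod p.toNat)) ^ t = 1 := euler hp hg0 hcop
  rw [List.all_eq_true]
  constructor
  · intro h
    refine orderOf_eq_of_pow_and_pow_div_prime (by omega) hx ?_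
    intro q hq hdvd
    have := h q ((prime_factors_mem t ht q).mpr ⟨hq, hdvd⟩)
    rw [bne_iff_ne] at this
    intro hone
    exact this ((powMod_eq_one_iff hp g (t / q)).mpr hone)
  · intro hord q hqmem
    obtain ⟨hq, hdvd⟩ := (prime_factors_mem t ht q).mp hqmem
    rw [bne_iff_ne]
    intro heq
    have h1 : ((g : ZMod p.toNat)) ^ (t / q) = 1 := (powMod_eq_one_iff hp g (t / q)).mp heq
    have h2 : orderOf ((g : ZMod p.toNat)) ∣ t / q := orderOf_dvd_of_pow_eq_one h1
    rw [hord] at h2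
    have h3 : 1 ≤ t / q := (Nat.one_le_div_iff hq.pos).mpr (Nat.le_of_dvd (by omega) hdvd)
    have h4 : t / q < t := Nat.div_lt_self (by omega) hq.one_lt
    have h5 := Nat.le_of_dvd (by omega) h2
    omega

-- ---------- per-candidate and per-modulus equality ----------

lemma test_eq {p g : Int} (hp : 2 ≤ p) (hg1 : 1 ≤ g) (hgp : g < p) :
    is_primitive_root g p
      = (Int.gcd g p == 1 &&
          (prime_factors (unitsL p).length).all
            (fun q => PySem.Int.powMod g ((unitsL p).length / q) p != 1)) := by
  by_cases hcop : Int.gcd g p = 1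
  · have hg0 : 0 ≤ g := by omega
    rw [Bool.eq_iff_iff]
    simp only [is_primitive_root, hcop, if_neg (by simp : ¬ (1 ≠ 1)), beq_self_eq_true,
      Bool.true_and]
    rw [show (((PySem.List.pyRange 1 p 1).filter (fun i => Int.gcd i p == 1)).length : Int)
          = ((unitsL p).length : Int) from rfl]
    rw [show ((PySem.List.pyRange 1 p 1).filter (fun i => Int.gcd i p == 1)) = unitsL p from rfl]
    rw [powersL_eq (p := p) (g := g) (unitsL p).length]
    rw [setEqual_iff_orderOf hp hg0 hcop, allTest_iff_orderOf hp hg0 hcop]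
  · simp [is_primitive_root, hcop]

lemma per_p_eq (p : Int) :
    findRootLoopA p (PySem.List.pyRange 1 p 1) false 0 = smallest_primitive_root p := by
  unfold smallest_primitive_root
  rw [findRootLoopA_eq_find?]
  congr 1
  apply find?_congr_mem
  intro g hg
  have hgp := PySem.List.mem_pyRange_one.mp hg
  exact test_eq (by omega) hgp.1 hgp.2

-- ===== VERDICT (by name: the statement is the Claim_ definition above) =====
theorem find_primitive_roots_spec : Claim_equal_find_primitive_roots := by
  intro n _
  unfold Spec_find_primitive_roots find_primitive_roots find_primitive_roots_alt
  rw [PySem.List.foldl_append_singleton_eq_map, List.nil_append]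
  exact List.map_congr_left (fun p _ => per_p_eq p)
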